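-- pv_equiv track=rewrite | github.com/aucker/leetcode | daily/python/Dec-6-Calculate-money-in-leetcode-bank.py | sumSeven
-- ===== SOURCE A (Python) =====
-- def sumSeven(s: int) -> int:
--     sum = 0
--     i = 1
--     while i <= 7:
--         sum += s
--         s += 1
--         i += 1
--     return sum
-- ===== SOURCE B (Python) =====
-- def sumSeven(s: int) -> int:
--     return 7 * s + 21
-- ===== Notes on version B (the rewrite author's own statement) =====
-- stated objective: simpler
-- what changed: Replaces the seven-iteration accumulation loop with a single closed-form arithmetic-series expression (no loop, no mutation).
import Mathlib
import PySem

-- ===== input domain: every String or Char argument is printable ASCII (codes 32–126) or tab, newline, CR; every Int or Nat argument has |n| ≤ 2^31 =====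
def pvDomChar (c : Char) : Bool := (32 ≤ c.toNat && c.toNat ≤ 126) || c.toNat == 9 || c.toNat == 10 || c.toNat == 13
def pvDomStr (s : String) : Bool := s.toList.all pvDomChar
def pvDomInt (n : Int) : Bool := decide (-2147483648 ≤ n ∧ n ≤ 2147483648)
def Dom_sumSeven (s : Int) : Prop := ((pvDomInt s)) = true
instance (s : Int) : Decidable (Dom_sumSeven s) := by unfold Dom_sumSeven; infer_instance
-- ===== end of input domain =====

-- B replaces A's 7-step accumulation loop by the closed-form sum 7*s + 21 (simpler).

-- ===== PORT A =====
-- A's while loop runs i = 1..7, adding the current s and then incrementing s.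
def sumSevenLoop (sum s : Int) (i : Nat) : Int :=
  if i ≤ 7 then sumSevenLoop (sum + s) (s + 1) (i + 1) else sum
termination_by 8 - i

def sumSeven (s : Int) : Int := sumSevenLoop 0 s 1

-- ===== PORT B =====
def sumSeven_alt (s : Int) : Int := 7 * s + 21

-- ===== PRECONDITION & SPEC =====
def Spec_sumSeven (s : Int) (out : Int) : Prop := out = sumSeven_alt s
instance (s : Int) (out : Int) : Decidable (Spec_sumSeven s out) := by unfold Spec_sumSeven; infer_instance

-- ===== CLAIM (what is proved, stated in full; the proofs are below) =====
def Claim_equal_sumSeven : Prop := ∀ (s : Int), Dom_sumSeven s → Spec_sumSeven s (sumSeven s)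

-- ===== LEMMAS AND PROOFS =====
theorem sumSevenLoop_unfold8 (sum s : Int) :
    sumSevenLoop sum s 1 = sum + 7 * s + 21 := by
  rw [sumSevenLoop, if_pos (by norm_num), sumSevenLoop, if_pos (by norm_num),
     sumSevenLoop, if_pos (by norm_num), sumSevenLoop, if_pos (by norm_num),
     sumSevenLoop, if_pos (by norm_num), sumSevenLoop, if_pos (by norm_num),
     sumSevenLoop, if_pos (by norm_num), sumSevenLoop, if_neg (by norm_num)]
  ring

-- ===== VERDICT (by name: the statement is the Claim_ definition above) =====
theorem sumSeven_spec : Claim_equal_sumSeven := by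
  intro s _
  unfold Spec_sumSeven sumSeven sumSeven_alt
  rw [sumSevenLoop_unfold8]
  ring
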